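-- pv_equiv track=rewrite | github.com/lewis6991/make-ls | src/make_ls/analysis.py | _recover_include_paths
-- ===== SOURCE A (Python) =====
-- INCLUDE_DIRECTIVES = frozenset({"include", "-include", "sinclude"})
--
-- def _recover_include_paths(
--     source_lines: list[str],
--     start_line: int,
--     end_line: int,
-- ) -> tuple[str, ...]:
--     logical_parts: list[str] = []
--     for line_number in range(start_line, end_line + 1):
--         text = _strip_make_comment(source_lines[line_number]).strip()
--         if line_number < end_line and text.endswith("\\"):
--             text = text[:-1].rstrip()
--         logical_parts.append(text)
--
--     logical_text = " ".join(part for part in logical_parts if part)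
--     if logical_text == "":
--         return ()
--
--     first_token, _separator, remainder = logical_text.partition(" ")
--     if first_token not in INCLUDE_DIRECTIVES:
--         return ()
--
--     return tuple(token for token in remainder.split() if token != "")
--
-- def _strip_make_comment(text: str) -> str:
--     escaped = False
--     for index, character in enumerate(text):
--         if escaped:
--             escaped = False
--             continue
--         if character == "\\":
--             escaped = True
--             continue
--         if character == "#":
--             return text[:index]
--     return text
-- ===== SOURCE B (Python) =====
-- INCLUDE_DIRECTIVES = frozenset({"include", "-include", "sinclude"})
--
-- def _strip_make_comment(text):
--     i = 0
--     n = len(text)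
--     while i < n:
--         c = text[i]
--         if c == "#":
--             return text[:i]
--         i += 2 if c == "\\" else 1
--     return text
--
-- def _recover_include_paths(source_lines, start_line, end_line):
--     paths = []
--     seen_directive = False
--     for line_number in range(start_line, end_line + 1):
--         text = _strip_make_comment(source_lines[line_number]).strip()
--         if line_number < end_line and text.endswith("\\"):
--             text = text[:-1].rstrip()
--         if not text:
--             continue
--         if seen_directive:
--             paths.extend(text.split())
--         else:
--             head, _, rest = text.partition(" ")
--             if head not in INCLUDE_DIRECTIVES:
--                 return ()
--             seen_directive = True
--             paths.extend(rest.split())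
--     return tuple(paths) if seen_directive else ()
-- ===== Notes on version B (the rewrite author's own statement) =====
-- stated objective: alternative
-- what changed: Replaces A's collect-all-parts / join-with-spaces / partition / re-split pipeline by a single streaming pass with a three-state machine (scanning/failed/collecting) that checks the directive on the first nonempty logical line, accumulates a flat token list directly, and exits early on a non-directive first token.
import Mathlib
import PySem

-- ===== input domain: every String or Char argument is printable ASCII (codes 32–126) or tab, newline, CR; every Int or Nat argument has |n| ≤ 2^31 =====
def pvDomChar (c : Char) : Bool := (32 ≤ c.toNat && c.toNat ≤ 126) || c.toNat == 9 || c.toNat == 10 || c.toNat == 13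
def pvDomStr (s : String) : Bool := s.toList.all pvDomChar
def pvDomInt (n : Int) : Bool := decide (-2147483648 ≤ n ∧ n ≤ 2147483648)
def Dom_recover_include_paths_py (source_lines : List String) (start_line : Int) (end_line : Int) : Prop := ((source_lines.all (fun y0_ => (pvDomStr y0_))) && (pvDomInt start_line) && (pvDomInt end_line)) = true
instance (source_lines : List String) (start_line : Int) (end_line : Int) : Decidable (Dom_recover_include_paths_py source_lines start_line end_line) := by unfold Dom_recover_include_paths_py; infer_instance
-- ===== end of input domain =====

-- B replaces A's join-then-partition-then-split pipeline by a single streaming pass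
-- (state machine: scanning / failed / collecting a flat token list) with an early exit
-- on a non-directive first token; objective: alternative decomposition, same cost.

-- shared module-level constant INCLUDE_DIRECTIVES (a frozenset used only for membership)
def pvIncludeDirectives : List (List Char) :=
  ["include".toList, "-include".toList, "sinclude".toList]

-- ===== PORT A =====

-- _strip_make_comment: enumerate loop with an 'escaped' flag; the early 'return text[:index]'
-- on an unescaped '#' becomes returning the prefix built so far
def stripMakeCommentA : List Char → Bool → List Char
  | [], _ => []
  | c :: rest, escaped =>
    if escaped then c :: stripMakeCommentA rest false
    else if c = '\\' then c :: stripMakeCommentA rest true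
    else if c = '#' then []
    else c :: stripMakeCommentA rest false

-- one iteration of A's line-loop body: comment strip, strip, non-final backslash continuation
-- (text[:-1] on a string ending in '\' is List.dropLast, exact; source_lines[n] is pyGet?,
-- some on every input Pre_ admits)
def pvProcessLineA (source_lines : List String) (end_line : Int) (n : Int) : List Char :=
  let text := PySem.Chars.strip (stripMakeCommentA ((PySem.List.pyGet? source_lines n).getD "").toList false)
  if n < end_line ∧ PySem.Chars.endswith text ['\\'] = true then PySem.Chars.rstrip text.dropLast
  else text

def recover_include_paths_py (source_lines : List String) (start_line : Int) (end_line : Int) : List String :=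
  let logical_parts := (PySem.List.pyRange start_line (end_line + 1) 1).foldl
    (fun acc n => acc ++ [pvProcessLineA source_lines end_line n]) []
  let logical_text := PySem.Chars.join [' '] (logical_parts.filter (fun p => p != []))
  if logical_text = [] then []
  else
    -- str.partition(" "): exact — text before the first ' ', and the text after it ([] if no ' ')
    let first_token := logical_text.takeWhile (fun c => c != ' ')
    let remainder := (logical_text.dropWhile (fun c => c != ' ')).drop 1
    if pvIncludeDirectives.contains first_token then
      ((PySem.Chars.split₀ remainder).filter (fun t => t != [])).map String.ofList
    else []

-- ===== PORT B =====

-- _strip_make_comment (B): index-jumping while loop, i += 2 over a backslash pair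
def stripMakeCommentB : List Char → List Char
  | [] => []
  | [c] => if c = '#' then [] else [c]
  | c :: d :: rest =>
    if c = '#' then []
    else if c = '\\' then c :: d :: stripMakeCommentB rest
    else c :: stripMakeCommentB (d :: rest)

def pvProcessLineB (source_lines : List String) (end_line : Int) (n : Int) : List Char :=
  let text := PySem.Chars.strip (stripMakeCommentB ((PySem.List.pyGet? source_lines n).getD "").toList)
  if n < end_line ∧ PySem.Chars.endswith text ['\\'] = true then PySem.Chars.rstrip text.dropLast
  else text

-- loop state of B: no directive line seen yet / early `return ()` taken / tokens collected so far
inductive PvBState where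
  | scanning : PvBState
  | failed : PvBState
  | collecting : List (List Char) → PvBState
deriving DecidableEq, Repr

-- B's loop body on one processed line text
def pvStep (s : PvBState) (text : List Char) : PvBState :=
  if text = [] then s                       -- if not text: continue
  else
    match s with
    | PvBState.failed => PvBState.failed    -- the early `return ()` was already taken
    | PvBState.collecting ps => PvBState.collecting (ps ++ PySem.Chars.split₀ text)
    | PvBState.scanning =>
      -- text.partition(" "): exact
      let head := text.takeWhile (fun c => c != ' ')
      let rest := (text.dropWhile (fun c => c != ' ')).drop 1
      if pvIncludeDirectives.contains head then PvBState.collecting (PySem.Chars.split₀ rest)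
      else PvBState.failed

-- `return tuple(paths) if seen_directive else ()` (and the early `return ()`)
def pvFinal : PvBState → List String
  | PvBState.collecting ps => ps.map String.ofList
  | _ => []

def recover_include_paths_py_alt (source_lines : List String) (start_line : Int) (end_line : Int) : List String :=
  pvFinal ((PySem.List.pyRange start_line (end_line + 1) 1).foldl
    (fun s n => pvStep s (pvProcessLineB source_lines end_line n)) PvBState.scanning)

-- ===== PRECONDITION & SPEC =====

-- Pre_ excludes exactly the IndexError inputs: every line number in range(start_line, end_line+1)
-- must be a valid Python index into source_lines (negative wraparound included, as Python accepts it);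
-- for a nonempty range that is: -len(source_lines) ≤ start_line and end_line < len(source_lines)
def Pre_recover_include_paths_py (source_lines : List String) (start_line : Int) (end_line : Int) : Prop :=
  end_line < start_line ∨
    (-(source_lines.length : Int) ≤ start_line ∧ end_line < (source_lines.length : Int))
instance (source_lines : List String) (start_line : Int) (end_line : Int) : Decidable (Pre_recover_include_paths_py source_lines start_line end_line) := by unfold Pre_recover_include_paths_py; infer_instance

def pvWitness_recover_include_paths_py : List String × Int × Int := (["include foo.mk \\", "  bar.mk"], 0, 1)

def Spec_recover_include_paths_py (source_lines : List String) (start_line : Int) (end_line : Int) (out : List String) : Prop := out = recover_include_paths_py_alt source_lines start_line end_line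
instance (source_lines : List String) (start_line : Int) (end_line : Int) (out : List String) : Decidable (Spec_recover_include_paths_py source_lines start_line end_line out) := by unfold Spec_recover_include_paths_py; infer_instance

-- ===== CLAIM (what is proved, stated in full; the proofs are below) =====
def Claim_equal_recover_include_paths_py : Prop := ∀ (source_lines : List String) (start_line : Int) (end_line : Int), Dom_recover_include_paths_py source_lines start_line end_line → Pre_recover_include_paths_py source_lines start_line end_line → Spec_recover_include_paths_py source_lines start_line end_line (recover_include_paths_py source_lines start_line end_line)

-- ===== LEMMAS AND PROOFS =====

-- the two comment strippers agree
theorem pv_strip_eq : ∀ cs : List Char, stripMakeCommentA cs false = stripMakeCommentB cs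
  | [] => rfl
  | [c] => by
    by_cases h : c = '#' <;> by_cases h2 : c = '\\' <;>
      simp_all [stripMakeCommentA, stripMakeCommentB]
  | c :: d :: rest => by
    have ih1 := pv_strip_eq rest
    have ih2 := pv_strip_eq (d :: rest)
    by_cases h : c = '#' <;> by_cases h2 : c = '\\' <;>
      simp_all [stripMakeCommentA, stripMakeCommentB]

theorem pv_processLine_eq (source_lines : List String) (end_line n : Int) :
    pvProcessLineA source_lines end_line n = pvProcessLineB source_lines end_line n := by
  simp [pvProcessLineA, pvProcessLineB, pv_strip_eq]

-- split₀.go facts ------------------------------------------------------------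

theorem pv_go_nil (cur : List Char) (acc : List (List Char)) :
    PySem.Chars.split₀.go [] cur acc
      = if cur.isEmpty then acc.reverse else (cur.reverse :: acc).reverse := by
  rw [PySem.Chars.split₀.go]

theorem pv_go_cons (c : Char) (s cur : List Char) (acc : List (List Char)) :
    PySem.Chars.split₀.go (c :: s) cur acc
      = if PySem.Chars.isspace c then
          (if cur.isEmpty then PySem.Chars.split₀.go s [] acc
           else PySem.Chars.split₀.go s [] (cur.reverse :: acc))
        else PySem.Chars.split₀.go s (c :: cur) acc := by
  rw [PySem.Chars.split₀.go]

theorem pv_go_acc (s : List Char) (cur : List Char) (acc : List (List Char)) :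
    PySem.Chars.split₀.go s cur acc = acc.reverse ++ PySem.Chars.split₀.go s cur [] := by
  induction s generalizing cur acc with
  | nil => by_cases h : cur.isEmpty <;> simp [pv_go_nil, h]
  | cons c s ih =>
    by_cases hs : PySem.Chars.isspace c
    · by_cases h : cur.isEmpty
      · simp only [pv_go_cons, hs, h, if_true]
        exact ih [] acc
      · simp only [pv_go_cons, hs, h, if_true, Bool.false_eq_true, if_false]
        rw [ih ([]) (cur.reverse :: acc), ih ([]) ([cur.reverse])]
        simp
    · simp only [pv_go_cons, hs, Bool.false_eq_true, if_false]
      rw [ih (c :: cur) acc]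

theorem pv_go_trailing_space (c : Char) (hc : PySem.Chars.isspace c = true) :
    ∀ (a : List Char) (cur : List Char) (acc : List (List Char)),
    PySem.Chars.split₀.go (a ++ [c]) cur acc = PySem.Chars.split₀.go a cur acc := by
  intro a
  induction a with
  | nil => intro cur acc; by_cases h : cur.isEmpty <;> simp [pv_go_cons, pv_go_nil, hc, h]
  | cons d a ih =>
    intro cur acc
    by_cases hd : PySem.Chars.isspace d
    · by_cases h : cur.isEmpty <;> simp [pv_go_cons, hd, h, ih]
    · simp [pv_go_cons, hd, ih]

theorem pv_go_space_append (c : Char) (hc : PySem.Chars.isspace c = true) (b : List Char) :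
    ∀ (a : List Char) (cur : List Char) (acc : List (List Char)),
    PySem.Chars.split₀.go (a ++ c :: b) cur acc =
      PySem.Chars.split₀.go (a ++ [c]) cur acc ++ PySem.Chars.split₀.go b [] [] := by
  intro a
  induction a with
  | nil =>
    intro cur acc
    by_cases h : cur.isEmpty
    · simp only [List.nil_append, pv_go_cons, pv_go_nil, hc, h, if_true]
      rw [pv_go_acc]
      simp
    · simp only [List.nil_append, pv_go_cons, pv_go_nil, hc, h, Bool.false_eq_true, if_false,
        if_true]
      rw [pv_go_acc b ([]) (cur.reverse :: acc)]
      simp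
  | cons d a ih =>
    intro cur acc
    by_cases hd : PySem.Chars.isspace d
    · by_cases h : cur.isEmpty <;> simp [pv_go_cons, hd, h, ih]
    · simp [pv_go_cons, hd, ih]

-- split₀ distributes over a whitespace separator
theorem pv_split₀_space_append (a b : List Char) :
    PySem.Chars.split₀ (a ++ ' ' :: b) = PySem.Chars.split₀ a ++ PySem.Chars.split₀ b := by
  have hc : PySem.Chars.isspace ' ' = true := by decide
  rw [PySem.Chars.split₀, PySem.Chars.split₀, PySem.Chars.split₀,
    pv_go_space_append ' ' hc, pv_go_trailing_space ' ' hc]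

-- split of the space-joined parts is the concatenation of the parts' splits
theorem pv_split₀_join (parts : List (List Char)) :
    PySem.Chars.split₀ (PySem.Chars.join [' '] parts) = parts.flatMap PySem.Chars.split₀ := by
  induction parts with
  | nil => rfl
  | cons p rest ih =>
    cases rest with
    | nil => simp [PySem.Chars.join_singleton]
    | cons q r =>
      rw [PySem.Chars.join_cons_cons]
      have h1 : p ++ [' '] ++ PySem.Chars.join [' '] (q :: r)
          = p ++ ' ' :: PySem.Chars.join [' '] (q :: r) := by simp
      rw [h1, pv_split₀_space_append, ih]
      simp

-- split₀ yields no empty tokens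
theorem pv_go_ne_nil (s : List Char) :
    ∀ (cur : List Char) (acc : List (List Char)), (∀ x ∈ acc, x ≠ []) →
      ∀ x ∈ PySem.Chars.split₀.go s cur acc, x ≠ [] := by
  induction s with
  | nil =>
    intro cur acc hacc x hx
    by_cases h : cur.isEmpty
    · rw [pv_go_nil, if_pos h] at hx
      exact hacc x (by simpa using hx)
    · rw [pv_go_nil, if_neg h] at hx
      simp only [List.reverse_cons, List.mem_append, List.mem_reverse, List.mem_singleton] at hx
      rcases hx with h2 | h1
      · exact hacc x h2
      · subst h1; simpa [List.isEmpty_iff] using h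
  | cons c s ih =>
    intro cur acc hacc x hx
    by_cases hs : PySem.Chars.isspace c
    · by_cases h : cur.isEmpty
      · rw [pv_go_cons, if_pos hs, if_pos h] at hx
        exact ih ([]) acc hacc x hx
      · rw [pv_go_cons, if_pos hs, if_neg h] at hx
        refine ih ([]) (cur.reverse :: acc) ?_ x hx
        intro y hy
        rcases List.mem_cons.mp hy with h1 | h2
        · subst h1; simpa [List.isEmpty_iff] using h
        · exact hacc y h2
    · rw [pv_go_cons, if_neg hs] at hx
      exact ih (c :: cur) acc hacc x hx

theorem pv_split₀_ne_nil (s : List Char) : ∀ x ∈ PySem.Chars.split₀ s, x ≠ [] := by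
  rw [PySem.Chars.split₀]
  exact pv_go_ne_nil s [] [] (by simp)

-- the filter in A's final comprehension is vacuous
theorem pv_filter_split₀ (s : List Char) :
    (PySem.Chars.split₀ s).filter (fun t => t != []) = PySem.Chars.split₀ s := by
  apply List.filter_eq_self.mpr
  intro a ha
  simpa using pv_split₀_ne_nil s a ha

-- flatMap split₀ ignores empty parts
theorem pv_flatMap_filter (parts : List (List Char)) :
    (parts.filter (fun p => p != [])).flatMap PySem.Chars.split₀ = parts.flatMap PySem.Chars.split₀ := by
  induction parts with
  | nil => rfl
  | cons p rest ih =>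
    by_cases h : p = []
    · subst h; simpa using ih
    · simp [h, ih]

-- A's post-processing of the parts list (proof-side name for A's code after its loop)
def pvPost (parts : List (List Char)) : List String :=
  let logical_text := PySem.Chars.join [' '] (parts.filter (fun p => p != []))
  if logical_text = [] then []
  else
    let first_token := logical_text.takeWhile (fun c => c != ' ')
    let remainder := (logical_text.dropWhile (fun c => c != ' ')).drop 1
    if pvIncludeDirectives.contains first_token then
      ((PySem.Chars.split₀ remainder).filter (fun t => t != [])).map String.ofList
    else []

theorem pv_foldl_failed (ts : List (List Char)) : ts.foldl pvStep PvBState.failed = PvBState.failed := by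
  induction ts with
  | nil => rfl
  | cons t ts ih => by_cases h : t = [] <;> simp [pvStep, h, ih]

theorem pv_foldl_collecting (ts : List (List Char)) :
    ∀ ps : List (List Char),
    ts.foldl pvStep (PvBState.collecting ps)
      = PvBState.collecting (ps ++ ts.flatMap PySem.Chars.split₀) := by
  induction ts with
  | nil => intro ps; simp
  | cons t ts ih =>
    intro ps
    by_cases h : t = []
    · subst h
      have : PySem.Chars.split₀ ([] : List Char) = [] := rfl
      simp [pvStep, ih, this]
    · simp [pvStep, h, ih]

-- the first ' '-delimited token of the joined text is that of its first nonempty part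
theorem pv_head_join (t : List Char) (frest : List (List Char)) :
    (PySem.Chars.join [' '] (t :: frest)).takeWhile (fun c => c != ' ') =
      t.takeWhile (fun c => c != ' ') := by
  cases frest with
  | nil => rw [PySem.Chars.join_singleton]
  | cons q r =>
    rw [PySem.Chars.join_cons_cons]
    have h1 : t ++ [' '] ++ PySem.Chars.join [' '] (q :: r)
        = t ++ (' ' :: PySem.Chars.join [' '] (q :: r)) := by simp
    rw [h1, List.takeWhile_append]
    by_cases h : (t.takeWhile (fun c => c != ' ')).length = t.length
    · have ht : t.takeWhile (fun c => c != ' ') = t :=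
        (List.takeWhile_prefix _).eq_of_length h
      rw [if_pos h, ht]
      simp
    · rw [if_neg h]

-- the remainder after the first ' ' of the joined text splits into the remainder
-- of the first part plus the tokens of the other parts
theorem pv_rem_join (t : List Char) (frest : List (List Char)) :
    PySem.Chars.split₀ (((PySem.Chars.join [' '] (t :: frest)).dropWhile (fun c => c != ' ')).drop 1) =
      PySem.Chars.split₀ ((t.dropWhile (fun c => c != ' ')).drop 1)
        ++ frest.flatMap PySem.Chars.split₀ := by
  cases frest with
  | nil => rw [PySem.Chars.join_singleton]; simp
  | cons q r =>
    rw [PySem.Chars.join_cons_cons]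
    have h1 : t ++ [' '] ++ PySem.Chars.join [' '] (q :: r)
        = t ++ (' ' :: PySem.Chars.join [' '] (q :: r)) := by simp
    rw [h1, List.dropWhile_append]
    by_cases h : (t.dropWhile (fun c => c != ' ')).isEmpty
    · have hd : List.dropWhile (fun c => c != ' ') (' ' :: PySem.Chars.join [' '] (q :: r))
          = ' ' :: PySem.Chars.join [' '] (q :: r) := by simp
      rw [if_pos h, hd]
      simp only [List.drop_succ_cons, List.drop_zero]
      rw [pv_split₀_join]
      have h0 : t.dropWhile (fun c => c != ' ') = [] := List.isEmpty_iff.mp h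
      rw [h0]
      rfl
    · rw [if_neg h]
      rcases hne : t.dropWhile (fun c => c != ' ') with _ | ⟨d, ds⟩
      · rw [hne] at h; simp at h
      · simp only [List.cons_append, List.drop_succ_cons, List.drop_zero]
        rw [pv_split₀_space_append, pv_split₀_join]

theorem pv_join_ne_nil (t : List Char) (frest : List (List Char)) (ht : t ≠ []) :
    PySem.Chars.join [' '] (t :: frest) ≠ [] := by
  cases frest with
  | nil => rw [PySem.Chars.join_singleton]; exact ht
  | cons q r => rw [PySem.Chars.join_cons_cons]; simp [ht]

-- main invariant: B's streaming fold computes A's post-processing of the parts list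
theorem pv_main (parts : List (List Char)) :
    pvFinal (parts.foldl pvStep PvBState.scanning) = pvPost parts := by
  induction parts with
  | nil => rfl
  | cons t rest ih =>
    by_cases h : t = []
    · subst h
      have hstep : pvStep PvBState.scanning ([] : List Char) = PvBState.scanning := by
        simp [pvStep]
      rw [List.foldl_cons, hstep, ih]
      simp [pvPost]
    · have hjoin := pv_join_ne_nil t (rest.filter (fun p => p != [])) h
      have hhead := pv_head_join t (rest.filter (fun p => p != []))
      have hrem := pv_rem_join t (rest.filter (fun p => p != []))
      have htb : (t != []) = true := by simpa using h
      rw [List.foldl_cons]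
      by_cases hdir : pvIncludeDirectives.contains (t.takeWhile (fun c => c != ' ')) = true
      · have hstep : pvStep PvBState.scanning t
            = PvBState.collecting (PySem.Chars.split₀ ((t.dropWhile (fun c => c != ' ')).drop 1)) := by
          simp only [pvStep, h]
          simp [List.mem_of_elem_eq_true hdir]
        rw [hstep, pv_foldl_collecting]
        simp only [pvFinal, pvPost, List.filter_cons, htb, if_true]
        rw [if_neg hjoin, hhead, if_pos hdir, pv_filter_split₀, hrem, pv_flatMap_filter]
      · have hstep : pvStep PvBState.scanning t = PvBState.failed := by
          simp only [pvStep, h]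
          simp only [List.contains_eq_mem] at hdir ⊢
          simp [hdir]
        rw [hstep, pv_foldl_failed]
        simp only [pvFinal, pvPost, List.filter_cons, htb, if_true]
        rw [if_neg hjoin, hhead, if_neg hdir]

-- ===== VERDICT (by name: the statement is the Claim_ definition above) =====
theorem recover_include_paths_py_spec : Claim_equal_recover_include_paths_py := by
  intro source_lines start_line end_line _hdom _hpre
  unfold Spec_recover_include_paths_py
  unfold recover_include_paths_py recover_include_paths_py_alt
  rw [PySem.List.foldl_append_singleton_eq_map, List.nil_append]
  have hmap : (PySem.List.pyRange start_line (end_line + 1) 1).map (pvProcessLineA source_lines end_line)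
      = (PySem.List.pyRange start_line (end_line + 1) 1).map (pvProcessLineB source_lines end_line) :=
    List.map_congr_left (fun n _ => pv_processLine_eq source_lines end_line n)
  rw [hmap, ← List.foldl_map, pv_main]
  rfl
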